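-- pv_equiv track=rewrite | github.com/stephen-lazaro/Misc | EpocratesChallengeS/FirstRound_StephenLazaro/wordpos.py | getRepetitions
-- ===== SOURCE A (Python) =====
-- def getRepetitions(word):
-- 	acc = {}
-- 	repList = []
-- 	for character in word:
-- 		if character in acc:
-- 			acc[character] += 1
-- 			if not character in repList:
-- 				repList.append(character)
-- 		else:
-- 			acc[character] = 1
-- 	return acc, repList
-- ===== SOURCE B (Python) =====
-- def getRepetitions(word):
--     # pass 1: frequency table
--     acc = {}
--     for c in word:
--         acc[c] = acc.get(c, 0) + 1
--     # pass 2: repeated chars, ordered by second occurrence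
--     seen = set()
--     repList = []
--     for c in word:
--         if c in seen and c not in repList:
--             repList.append(c)
--         seen.add(c)
--     return acc, repList
-- ===== Notes on version B (the rewrite author's own statement) =====
-- stated objective: simpler
-- what changed: Two separate passes over the word: one builds the frequency dict with get(c,0)+1, a second detects repeats using a membership set of already-visited characters, instead of A's single fold interleaving counting and repeat detection.
import Mathlib
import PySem

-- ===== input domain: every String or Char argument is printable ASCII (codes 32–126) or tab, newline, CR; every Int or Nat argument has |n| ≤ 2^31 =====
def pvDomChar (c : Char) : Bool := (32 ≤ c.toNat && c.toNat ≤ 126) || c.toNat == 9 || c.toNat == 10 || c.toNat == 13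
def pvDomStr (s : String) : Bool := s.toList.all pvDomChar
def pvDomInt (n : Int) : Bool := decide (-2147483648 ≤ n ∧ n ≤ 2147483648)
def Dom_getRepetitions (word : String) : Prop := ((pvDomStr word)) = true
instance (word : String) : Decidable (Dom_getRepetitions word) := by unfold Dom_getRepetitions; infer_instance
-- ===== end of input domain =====

-- B splits A's single interleaved loop into two passes: one counting pass, one repeat-detection pass with a 'seen' set.
-- Equivalence of the return values is proved; neither version mutates its argument.

-- ===== PORT A =====
-- single pass: acc counts, repList collects characters on their second occurrence
def getRepetitions (word : String) : (List (String × Int)) × List String :=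
  let st := word.toList.foldl
    (fun (st : PySem.Dict String Int × List String) c =>
      let k : String := (String.ofList [c])
      if st.1.contains k then
        (st.1.insert k (st.1.getD k 0 + 1),
         if st.2.contains k then st.2 else st.2 ++ [k])
      else
        (st.1.insert k 1, st.2))
    (PySem.Dict.empty, [])
  (st.1.items, st.2)

-- ===== PORT B =====
-- pass 1: frequency table; pass 2: repeats via a 'seen' set
def getRepetitions_alt (word : String) : (List (String × Int)) × List String :=
  let acc := word.toList.foldl
    (fun (d : PySem.Dict String Int) c => d.insert (String.ofList [c]) (d.getD (String.ofList [c]) 0 + 1))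
    PySem.Dict.empty
  let st2 := word.toList.foldl
    (fun (st : PySem.Set String × List String) c =>
      let k : String := (String.ofList [c])
      ((PySem.Set.add st.1 k),
       if st.1.contains k && !(st.2.contains k) then st.2 ++ [k] else st.2))
    (PySem.Set.empty, [])
  (acc.items, st2.2)

-- ===== PRECONDITION & SPEC =====
def Spec_getRepetitions (word : String) (out : (List (String × Int)) × List String) : Prop := out = getRepetitions_alt word
instance (word : String) (out : (List (String × Int)) × List String) : Decidable (Spec_getRepetitions word out) := by unfold Spec_getRepetitions; infer_instance

-- ===== CLAIM (what is proved, stated in full; the proofs are below) =====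
def Claim_equal_getRepetitions : Prop := ∀ (word : String), Dom_getRepetitions word → Spec_getRepetitions word (getRepetitions word)

-- ===== LEMMAS AND PROOFS =====

lemma set_contains_add (s : PySem.Set String) (k k' : String) :
    (PySem.Set.add s k).contains k' = (k' == k || s.contains k') := by
  simp only [PySem.Set.contains, PySem.Set.add, List.contains_eq_mem, decide_eq_true_eq]
  by_cases h : k ∈ s
  · simp only [if_pos h]
    by_cases h' : k' = k <;> simp [h', h]
  · simp only [if_neg h, List.mem_append, List.mem_singleton]
    by_cases h' : k' = k <;> simp [h']

lemma main_invariant (cs : List Char) (d : PySem.Dict String Int)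
    (seen : PySem.Set String) (r : List String)
    (h : ∀ k, d.contains k = seen.contains k) :
    cs.foldl
      (fun (st : PySem.Dict String Int × List String) c =>
        let k : String := (String.ofList [c])
        if st.1.contains k then
          (st.1.insert k (st.1.getD k 0 + 1),
           if st.2.contains k then st.2 else st.2 ++ [k])
        else
          (st.1.insert k 1, st.2)) (d, r)
    = (cs.foldl
        (fun (d : PySem.Dict String Int) c => d.insert (String.ofList [c]) (d.getD (String.ofList [c]) 0 + 1)) d,
       (cs.foldl
        (fun (st : PySem.Set String × List String) c =>
          let k : String := (String.ofList [c])
          ((PySem.Set.add st.1 k),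
           if st.1.contains k && !(st.2.contains k) then st.2 ++ [k] else st.2))
        (seen, r)).2) := by
  induction cs generalizing d seen r with
  | nil => rfl
  | cons c cs ih =>
    simp only [List.foldl_cons]
    set k : String := (String.ofList [c]) with hk
    by_cases hc : d.contains k = true
    · have hs : seen.contains k = true := by rw [← h]; exact hc
      have hinv : ∀ k', (d.insert k (d.getD k 0 + 1)).contains k'
          = (PySem.Set.add seen k).contains k' := by
        intro k'; rw [PySem.Dict.contains_insert, set_contains_add, h]
      by_cases hr : r.contains k = true
      · simp only [hc, hs, hr, Bool.true_and, Bool.not_true, if_true,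
          Bool.false_eq_true, if_false]
        exact ih _ _ _ hinv
      · have hrf : r.contains k = false := by simpa using hr
        simp only [hc, hs, hrf, Bool.true_and, Bool.not_false, if_true,
          Bool.false_eq_true, if_false]
        exact ih _ _ _ hinv
    · have hcf : d.contains k = false := by simpa using hc
      have hs : seen.contains k = false := by rw [← h]; exact hcf
      have hd0 : d.getD k 0 = 0 := PySem.Dict.getD_of_not_contains d 0 hcf
      have hinv : ∀ k', (d.insert k 1).contains k'
          = (PySem.Set.add seen k).contains k' := by
        intro k'; rw [PySem.Dict.contains_insert, set_contains_add, h]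
      simp only [hcf, hs, Bool.false_and, Bool.false_eq_true, if_false]
      have hins : d.insert k (d.getD k 0 + 1) = d.insert k 1 := by
        rw [hd0]; norm_num
      rw [hins]
      exact ih _ _ _ hinv

-- ===== VERDICT (by name: the statement is the Claim_ definition above) =====
theorem getRepetitions_spec : Claim_equal_getRepetitions := by
  intro word _
  unfold Spec_getRepetitions getRepetitions getRepetitions_alt
  rw [main_invariant word.toList PySem.Dict.empty PySem.Set.empty []
    (by intro k; simp [PySem.Dict.contains_empty, PySem.Set.empty, PySem.Set.contains])]
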